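-- pv_equiv track=rewrite | github.com/Shanaldo/Shortest-Route | backend/distance_matrix.py | classify_road_type
-- ===== SOURCE A (Python) =====
-- def classify_road_type(source, destination, locations):
--     """
--     Determine what kind of road connects two locations.
--     Includes proper handling for avoid_highway logic for Spanish Town and Old Harbour.
--     """
--
--     # Bi-directional helper
--     def is_match(pair_list):
--         return any((source == a and destination == b) or (source == b and destination == a) for a, b in pair_list)
--
--     # Highways (to be avoided when user chooses avoid_highways=True)
--     highway_routes = [
--
--     ]
--
--     # Primary roads (main roads, non-highways)
--     primary_routes = [
--         ("new_kingston", "halfway_tree"),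
--         ("new_kingston", "cross_roads"),
--         ("new_kingston", "liguanea"),
--         ("constant_spring", "halfway_tree"),
--         ("manor_park", "constant_spring"),
--
--         # Non-highway connections for Spanish Town & Old Harbour
--         ("spanish_town", "cross_roads"),
--         ("old_harbour", "cross_roads"),
--         ("spanish_town", "halfway_tree"),
--         ("old_harbour", "halfway_tree"),
--         ("old_harbour", "liguanea"),
--         ("spanish_town", "liguanea"),
--     ]
--
--     # Tertiary roads for university areas
--     university_areas = {"mona", "papine", "university_hospital", "mona_heights", "hope_zoo"}
--
--     # Classification logic
--     if is_match(highway_routes):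
--         return "highway"
--     if is_match(primary_routes):
--         return "primary"
--     if source in university_areas and destination in university_areas:
--         return "tertiary"
--
--     # Default fallback
--     return "primary"
-- ===== SOURCE B (Python) =====
-- # Simpler: the highway list is empty and a primary-routes match returns the same
-- # value as the default, so only the university-area check matters.
-- UNIVERSITY_AREAS = frozenset({"mona", "papine", "university_hospital", "mona_heights", "hope_zoo"})
--
--
-- def classify_road_type(source, destination, locations):
--     if source in UNIVERSITY_AREAS and destination in UNIVERSITY_AREAS:
--         return "tertiary"
--     return "primary"
-- ===== Notes on version B (the rewrite author's own statement) =====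
-- stated objective: simpler
-- what changed: B drops A's bidirectional scans of the (empty) highway list and of the primary-routes list, whose match returns the same value as the default, keeping only the university-area membership test; this is valid because no primary-routes endpoint is a university area.
import Mathlib
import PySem

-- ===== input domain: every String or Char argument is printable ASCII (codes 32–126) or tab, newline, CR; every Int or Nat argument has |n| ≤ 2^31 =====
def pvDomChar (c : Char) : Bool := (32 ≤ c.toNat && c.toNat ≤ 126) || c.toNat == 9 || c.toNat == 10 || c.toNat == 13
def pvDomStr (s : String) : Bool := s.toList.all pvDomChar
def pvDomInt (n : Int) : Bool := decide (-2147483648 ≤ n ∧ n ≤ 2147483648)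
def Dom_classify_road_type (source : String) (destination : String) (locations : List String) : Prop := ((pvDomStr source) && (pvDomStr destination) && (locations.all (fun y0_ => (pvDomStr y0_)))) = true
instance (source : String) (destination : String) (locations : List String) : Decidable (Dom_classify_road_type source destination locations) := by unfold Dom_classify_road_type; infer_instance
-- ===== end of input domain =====

-- B drops A's scans of the (empty) highway list and of the primary-routes list (whose
-- match returns the same value as the default), keeping only the university-area test;
-- objective: simpler.

-- ===== PORT A =====
def classify_road_type (source : String) (destination : String) (locations : List String) : String :=
  -- Bi-directional helper
  let is_match : List (String × String) → Bool := fun pair_list =>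
    pair_list.any (fun p => (source == p.1 && destination == p.2) || (source == p.2 && destination == p.1))
  let highway_routes : List (String × String) := []
  let primary_routes : List (String × String) := [
    ("new_kingston", "halfway_tree"),
    ("new_kingston", "cross_roads"),
    ("new_kingston", "liguanea"),
    ("constant_spring", "halfway_tree"),
    ("manor_park", "constant_spring"),
    ("spanish_town", "cross_roads"),
    ("old_harbour", "cross_roads"),
    ("spanish_town", "halfway_tree"),
    ("old_harbour", "halfway_tree"),
    ("old_harbour", "liguanea"),
    ("spanish_town", "liguanea")]
  let university_areas : PySem.Set String :=
    PySem.Set.ofList ["mona", "papine", "university_hospital", "mona_heights", "hope_zoo"]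
  if is_match highway_routes then "highway"
  else if is_match primary_routes then "primary"
  else if PySem.Set.contains university_areas source && PySem.Set.contains university_areas destination then "tertiary"
  else "primary"

-- ===== PORT B =====
def pvUniversityAreas : PySem.Set String :=
  PySem.Set.ofList ["mona", "papine", "university_hospital", "mona_heights", "hope_zoo"]

def classify_road_type_alt (source : String) (destination : String) (locations : List String) : String :=
  if PySem.Set.contains pvUniversityAreas source && PySem.Set.contains pvUniversityAreas destination then "tertiary"
  else "primary"

-- ===== PRECONDITION & SPEC =====
def Spec_classify_road_type (source : String) (destination : String) (locations : List String) (out : String) : Prop := out = classify_road_type_alt source destination locations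
instance (source : String) (destination : String) (locations : List String) (out : String) : Decidable (Spec_classify_road_type source destination locations out) := by unfold Spec_classify_road_type; infer_instance

-- ===== CLAIM (what is proved, stated in full; the proofs are below) =====
def Claim_equal_classify_road_type : Prop := ∀ (source : String) (destination : String) (locations : List String), Dom_classify_road_type source destination locations → Spec_classify_road_type source destination locations (classify_road_type source destination locations)

-- ===== LEMMAS AND PROOFS =====

-- No endpoint of A's primary_routes is a university area, so when the source is a
-- university area A's primary-routes scan cannot match.
theorem pv_no_primary_match_of_uni (source destination : String)
    (hs : source ∈ pvUniversityAreas) :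
    ([(("new_kingston":String), ("halfway_tree":String)),
      ("new_kingston", "cross_roads"),
      ("new_kingston", "liguanea"),
      ("constant_spring", "halfway_tree"),
      ("manor_park", "constant_spring"),
      ("spanish_town", "cross_roads"),
      ("old_harbour", "cross_roads"),
      ("spanish_town", "halfway_tree"),
      ("old_harbour", "halfway_tree"),
      ("old_harbour", "liguanea"),
      ("spanish_town", "liguanea")].any
        (fun p => (source == p.1 && destination == p.2) || (source == p.2 && destination == p.1))) = false := by
  have hs' : source ∈ (["mona", "papine", "university_hospital", "mona_heights", "hope_zoo"] : List String) := by
    simpa [pvUniversityAreas, PySem.Set.mem_ofList] using hs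
  fin_cases hs' <;> simp

-- ===== VERDICT (by name: the statement is the Claim_ definition above) =====
theorem classify_road_type_spec : Claim_equal_classify_road_type := by
  intro source destination locations _
  unfold Spec_classify_road_type classify_road_type classify_road_type_alt
  by_cases hs : PySem.Set.contains pvUniversityAreas source = true
  · have hmem : source ∈ pvUniversityAreas := (PySem.Set.contains_iff _ _).mp hs
    simp only [pv_no_primary_match_of_uni source destination hmem]
    simp [pvUniversityAreas]
  · have hs' : PySem.Set.contains pvUniversityAreas source = false := by
      simpa using hs
    simp [pvUniversityAreas] at hs'
    simp [pvUniversityAreas]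
    intro _ hsrc
    tauto
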